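-- pv_equiv track=rewrite | github.com/agustinobillgate/server-less | functions/additional_functions.py | update_key_delimited_data
-- ===== SOURCE A (Python) =====
-- def update_key_delimited_data(input_str,delimiter,key,value=""):
--     foundFlag = False
--
--     data_list = input_str.split(delimiter)
--     output = ""
--     for data in data_list:
--         if data.startswith(key) and not foundFlag:
--             output += key + value + ";"
--             foundFlag = True
--         else:
--             # amazonq-ignore-next-line
--             output += data + ";"
--
--     if not foundFlag:
--         output += key + value
--
--     return output
-- ===== SOURCE B (Python) =====
-- def update_key_delimited_data(input_str, delimiter, key, value=""):
--     data_list = input_str.split(delimiter)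
--     i = next((j for j, d in enumerate(data_list) if d.startswith(key)), None)
--     if i is None:
--         return ";".join(data_list + [key + value])
--     new_list = list(data_list)
--     new_list[i] = key + value
--     return ";".join(new_list) + ";"
-- ===== Notes on version B (the rewrite author's own statement) =====
-- stated objective: simpler
-- what changed: Replaces the flag-driven loop that interleaves searching and string concatenation with a locate-then-reconstruct decomposition: find the first key-prefixed element's index, replace it in a copy, and build the result with one ';'.join.
import Mathlib
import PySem

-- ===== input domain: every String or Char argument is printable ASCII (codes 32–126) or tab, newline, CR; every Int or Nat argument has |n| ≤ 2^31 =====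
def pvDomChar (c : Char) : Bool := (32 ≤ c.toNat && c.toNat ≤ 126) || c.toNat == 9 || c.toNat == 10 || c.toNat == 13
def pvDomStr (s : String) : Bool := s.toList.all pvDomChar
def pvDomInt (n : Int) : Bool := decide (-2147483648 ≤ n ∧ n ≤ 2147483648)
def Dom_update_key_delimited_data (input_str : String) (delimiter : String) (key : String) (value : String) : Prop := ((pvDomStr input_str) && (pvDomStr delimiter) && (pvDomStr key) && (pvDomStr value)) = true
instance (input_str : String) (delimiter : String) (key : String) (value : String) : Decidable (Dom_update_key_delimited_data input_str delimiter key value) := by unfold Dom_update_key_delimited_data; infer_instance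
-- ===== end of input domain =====

-- B replaces A's flag-driven interleaved concatenation loop by locate-then-reconstruct
-- (find the first key-prefixed index, replace it, one ';'.join); objective: simpler.

-- ===== PORT A =====
-- the for-loop of A over data_list, state = (output, foundFlag)
def pvLoopA (key value : String) : List String → String × Bool → String × Bool
  | [], st => st
  | data :: rest, st =>
      if PySem.Str.startswith data key && !st.2 then
        pvLoopA key value rest (st.1 ++ key ++ value ++ ";", true)
      else
        pvLoopA key value rest (st.1 ++ data ++ ";", st.2)

def update_key_delimited_data (input_str : String) (delimiter : String) (key : String) (value : String) : String :=
  let data_list := (PySem.Str.split? input_str delimiter).getD []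
  let st := pvLoopA key value data_list ("", false)
  if !st.2 then st.1 ++ key ++ value else st.1

-- ===== PORT B =====
def update_key_delimited_data_alt (input_str : String) (delimiter : String) (key : String) (value : String) : String :=
  let data_list := (PySem.Str.split? input_str delimiter).getD []
  match data_list.findIdx? (fun d => PySem.Str.startswith d key) with
  | none => PySem.Str.join ";" (data_list ++ [key ++ value])
  | some i => PySem.Str.join ";" (data_list.set i (key ++ value)) ++ ";"

-- ===== PRECONDITION & SPEC =====
-- Pre_ excludes only delimiter = "", on which Python's str.split raises ValueError (both A and B raise there).
def Pre_update_key_delimited_data (input_str : String) (delimiter : String) (key : String) (value : String) : Prop := delimiter ≠ ""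
instance (input_str : String) (delimiter : String) (key : String) (value : String) : Decidable (Pre_update_key_delimited_data input_str delimiter key value) := by unfold Pre_update_key_delimited_data; infer_instance
def pvWitness_update_key_delimited_data : String × String × String × String := ("a=1;b=2", ";", "b", "=3")

def Spec_update_key_delimited_data (input_str : String) (delimiter : String) (key : String) (value : String) (out : String) : Prop := out = update_key_delimited_data_alt input_str delimiter key value
instance (input_str : String) (delimiter : String) (key : String) (value : String) (out : String) : Decidable (Spec_update_key_delimited_data input_str delimiter key value out) := by unfold Spec_update_key_delimited_data; infer_instance

-- ===== CLAIM (what is proved, stated in full; the proofs are below) =====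
def Claim_equal_update_key_delimited_data : Prop := ∀ (input_str : String) (delimiter : String) (key : String) (value : String), Dom_update_key_delimited_data input_str delimiter key value → Pre_update_key_delimited_data input_str delimiter key value → Spec_update_key_delimited_data input_str delimiter key value (update_key_delimited_data input_str delimiter key value)

-- ===== LEMMAS AND PROOFS =====

-- "d0;d1;...;dn;" : each element followed by a ';'
def pvSemis : List String → String
  | [] => ""
  | d :: t => d ++ ";" ++ pvSemis t

theorem pv_join_cons_ne (d : String) (m : List String) (h : m ≠ []) :
    PySem.Str.join ";" (d :: m) = d ++ ";" ++ PySem.Str.join ";" m := by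
  obtain ⟨y, t, rfl⟩ := List.exists_cons_of_ne_nil h
  simp only [PySem.Str.join, List.map_cons, PySem.Chars.join_cons_cons, String.ofList_append]
  rw [show String.toList ";" = [';'] from rfl, show (String.ofList [';'] = ";") from rfl,
    String.ofList_toList]

theorem pv_joinS (x : String) (t : List String) :
    PySem.Str.join ";" (x :: t) ++ ";" = x ++ ";" ++ pvSemis t := by
  induction t generalizing x with
  | nil => simp [PySem.Str.join, PySem.Chars.join, pvSemis, List.intercalate]
  | cons y t ih =>
      rw [pv_join_cons_ne x (y :: t) (by simp), pvSemis, String.append_assoc, String.append_assoc,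
        ← ih y]
      simp [String.append_assoc]

theorem pv_loopA_true (key value : String) (t : List String) (acc : String) :
    pvLoopA key value t (acc, true) = (acc ++ pvSemis t, true) := by
  induction t generalizing acc with
  | nil => simp [pvLoopA, pvSemis]
  | cons d t ih => simp [pvLoopA, ih, pvSemis, String.append_assoc]

theorem pv_main (key value : String) (l : List String) (acc : String) :
    (if !(pvLoopA key value l (acc, false)).2
       then (pvLoopA key value l (acc, false)).1 ++ key ++ value
       else (pvLoopA key value l (acc, false)).1)
    = acc ++ (match l.findIdx? (fun d => PySem.Str.startswith d key) with
      | none => PySem.Str.join ";" (l ++ [key ++ value])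
      | some i => PySem.Str.join ";" (l.set i (key ++ value)) ++ ";") := by
  induction l generalizing acc with
  | nil =>
      simp [pvLoopA, PySem.Str.join, PySem.Chars.join, String.append_assoc, List.intercalate,
        String.ofList_append]
  | cons d t ih =>
      by_cases hp : PySem.Str.startswith d key = true
      · simp only [pvLoopA, hp, Bool.not_false, Bool.and_true, if_pos, List.findIdx?_cons,
          List.set_cons_zero, pv_loopA_true, Bool.not_true]
        rw [pv_joinS]
        simp [String.append_assoc]
      · have hp' : PySem.Str.startswith d key = false := by simpa using hp
        simp only [pvLoopA, hp', Bool.false_and, if_neg, Bool.not_false, List.findIdx?_cons,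
          Bool.false_eq_true, not_false_iff]
        rw [ih (acc ++ d ++ ";")]
        cases hfi : t.findIdx? (fun d => PySem.Str.startswith d key) with
        | none =>
            simp only [Option.map_none]
            rw [List.cons_append, pv_join_cons_ne d (t ++ [key ++ value]) (by simp)]
            simp [String.append_assoc]
        | some i =>
            have ht : t ≠ [] := by rintro rfl; simp at hfi
            simp only [Option.map_some]
            rw [List.set_cons_succ, pv_join_cons_ne d (t.set i (key ++ value)) (by simpa using ht)]
            simp [String.append_assoc]

-- ===== VERDICT (by name: the statement is the Claim_ definition above) =====
theorem update_key_delimited_data_spec : Claim_equal_update_key_delimited_data := by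
  intro input_str delimiter key value _ hpre
  unfold Spec_update_key_delimited_data update_key_delimited_data update_key_delimited_data_alt
  exact pv_main key value _ ""
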